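-- pv_equiv track=rewrite | github.com/vrbadev/FIMD | cpu/generate.py | get_boundary_evaluation_order
-- ===== SOURCE A (Python) =====
-- def get_boundary_evaluation_order(boundary: list) -> list:
--     """
--     Sorts boundary pixels to determine the evaluation order for FIMD.
--     Picks the most mutually distant points from a single quadrant.
--     In case of multiple equally distant points, point with the largest y coordinate is chosen.
--     Evaluation order starts with the first point from the generation order, i.e., (0, r).
--
--     Args:
--         boundary (list of tuples): Coordinates of boundary pixels.
--
--     Returns:
--         list: Sorted list of boundary pixel coordinates in evaluation order.
--     """
--     quadrant = [(y, x) for y, x in boundary if y >= 0 and x >= 0]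
--     radius = max([y for y, x in boundary])
--     evaluation_order = list()
--     quadrant_dists = [max(y, radius-x) for y, x in quadrant]
--     i_next = 0
--
--     while len(evaluation_order) < len(boundary):
--         y, x = quadrant[i_next]
--         evaluation_order.append((y, x))
--         evaluation_order.append((-y, -x))
--         if x == 0:
--             evaluation_order.append((0, y))
--             evaluation_order.append((0, -y))
--         else:
--             evaluation_order.append((x, -y))
--             evaluation_order.append((-x, y))
--         quadrant_dists[i_next] = 0
--
--         sel_d_y = (0, 0)
--         sel_i = 0
--         for i in range(len(quadrant_dists)):
--             y_i, x_i = quadrant[i]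
--             dist = max(abs(y_i - y), abs(x_i - x))
--             if quadrant_dists[i] > dist:
--                 quadrant_dists[i] = dist
--
--             if quadrant_dists[i] > sel_d_y[0] or (quadrant_dists[i] == sel_d_y[0] and y_i > sel_d_y[1]):
--                 sel_d_y = (quadrant_dists[i], y_i)
--                 sel_i = i
--         i_next = sel_i
--
--     return evaluation_order
-- ===== SOURCE B (Python) =====
-- def get_boundary_evaluation_order(boundary: list) -> list:
--     """Same evaluation order as A, but instead of maintaining an incrementally
--     updated min-distance array, the current distance of each candidate is
--     recomputed from scratch against the list of already-selected points."""
--     quadrant = [(y, x) for y, x in boundary if y >= 0 and x >= 0]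
--     radius = max(y for y, x in boundary)
--     n = len(boundary)
--
--     def emit(order, p):
--         y, x = p
--         order.append((y, x))
--         order.append((-y, -x))
--         if x == 0:
--             order.append((0, y))
--             order.append((0, -y))
--         else:
--             order.append((x, -y))
--             order.append((-x, y))
--
--     selected = [quadrant[0]]
--     order = []
--     emit(order, quadrant[0])
--     while len(order) < n:
--         best_i, best_d, best_y = 0, 0, 0
--         for i, (yi, xi) in enumerate(quadrant):
--             d = max(yi, radius - xi)
--             for sy, sx in selected:
--                 d = min(d, max(abs(yi - sy), abs(xi - sx)))
--             if d > best_d or (d == best_d and yi > best_y):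
--                 best_i, best_d, best_y = i, d, yi
--         p = quadrant[best_i]
--         selected.append(p)
--         emit(order, p)
--     return order
-- ===== Notes on version B (the rewrite author's own statement) =====
-- stated objective: alternative
-- what changed: Replaces A's incrementally maintained min-distance array (fused update-then-select pass) with a kept list of selected points from which each candidate's distance is recomputed from scratch every iteration.
-- outside the precondition, e.g. on get_boundary_evaluation_order([(-1, -2)]): A raises IndexError, B raises IndexError; on get_boundary_evaluation_order([]): A raises ValueError, B raises ValueError
import Mathlib
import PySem

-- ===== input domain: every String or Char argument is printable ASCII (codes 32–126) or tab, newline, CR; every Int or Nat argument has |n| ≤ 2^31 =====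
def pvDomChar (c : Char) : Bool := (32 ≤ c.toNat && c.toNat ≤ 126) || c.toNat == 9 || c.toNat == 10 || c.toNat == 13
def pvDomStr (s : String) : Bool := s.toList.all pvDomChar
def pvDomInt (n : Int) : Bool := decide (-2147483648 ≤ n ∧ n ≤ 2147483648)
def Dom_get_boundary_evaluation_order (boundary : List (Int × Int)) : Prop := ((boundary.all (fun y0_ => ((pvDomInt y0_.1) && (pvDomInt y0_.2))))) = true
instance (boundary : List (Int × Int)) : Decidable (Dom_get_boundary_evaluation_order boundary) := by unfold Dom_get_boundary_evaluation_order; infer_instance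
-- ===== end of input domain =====

-- B keeps a list of selected points and recomputes each candidate's distance from scratch,
-- replacing A's incrementally maintained min-distance array (objective: alternative, not faster).

-- ===== PORT A =====
-- the 4-point reflection block A appends for the chosen quadrant point
def pa_block (p : Int × Int) : List (Int × Int) :=
  [(p.1, p.2), (-p.1, -p.2)] ++
    (if p.2 = 0 then [((0 : Int), p.1), (0, -p.1)] else [(p.2, -p.1), (-p.2, p.1)])

-- A's inner `for i in range(len(quadrant_dists))` loop: walks dists and quadrant in step,
-- updating dists[i] in place and tracking (sel_d_y, sel_i); same state, as structural recursion
def pa_inner (c : Int × Int) : Nat → (Int × Int) → Nat → List Int → List (Int × Int) →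
    List Int × (Int × Int) × Nat
  | _, sdy, si, [], _ => ([], sdy, si)
  | _, sdy, si, ds, [] => (ds, sdy, si)
  | i, sdy, si, d :: ds, p :: qs =>
    let dist := max |p.1 - c.1| |p.2 - c.2|
    let d' := if dist < d then dist else d
    let s := if sdy.1 < d' ∨ (d' = sdy.1 ∧ sdy.2 < p.1) then ((d', p.1), i) else (sdy, si)
    let r := pa_inner c (i + 1) s.1 s.2 ds qs
    (d' :: r.1, r.2)

-- A's `while len(evaluation_order) < len(boundary)` loop
def pa_loop (q : List (Int × Int)) (n : Nat) (ds : List Int) (iNext : Nat)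
    (acc : List (Int × Int)) : List (Int × Int) :=
  if _h : acc.length < n then
    let p := q.getD iNext (0, 0)
    let r := pa_inner p 0 (0, 0) 0 (ds.set iNext 0) q
    pa_loop q n r.1 r.2.2 (acc ++ pa_block p)
  else acc
  termination_by n - acc.length
  decreasing_by simp [pa_block]; split <;> simp <;> omega

def get_boundary_evaluation_order (boundary : List (Int × Int)) : List (Int × Int) :=
  let quadrant := boundary.filter (fun p => decide (0 ≤ p.1) && decide (0 ≤ p.2))
  let radius := (PySem.List.max? (boundary.map (fun p => p.1)) (fun y => y)).getD 0
  let dists := quadrant.map (fun p => max p.1 (radius - p.2))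
  pa_loop quadrant boundary.length dists 0 []

-- ===== PORT B =====
-- B's emit helper: same 4-point reflection block
def pb_emit (p : Int × Int) : List (Int × Int) :=
  [(p.1, p.2), (-p.1, -p.2)] ++
    (if p.2 = 0 then [((0 : Int), p.1), (0, -p.1)] else [(p.2, -p.1), (-p.2, p.1)])

-- B's recomputed distance: d = max(yi, radius-xi) then min over all selected points
def pb_dist (radius : Int) (selected : List (Int × Int)) (p : Int × Int) : Int :=
  selected.foldl (fun d s => min d (max |p.1 - s.1| |p.2 - s.2|)) (max p.1 (radius - p.2))

-- B's `for i, (yi, xi) in enumerate(quadrant)` best-candidate scan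
def pb_select (radius : Int) (selected : List (Int × Int)) : Nat → Nat × Int × Int →
    List (Int × Int) → Nat
  | _, best, [] => best.1
  | i, best, p :: qs =>
    let d := pb_dist radius selected p
    let b := if best.2.1 < d ∨ (d = best.2.1 ∧ best.2.2 < p.1) then (i, d, p.1) else best
    pb_select radius selected (i + 1) b qs

-- B's `while len(order) < n` loop
def pb_loop (q : List (Int × Int)) (radius : Int) (n : Nat) (selected : List (Int × Int))
    (acc : List (Int × Int)) : List (Int × Int) :=
  if _h : acc.length < n then
    let p := q.getD (pb_select radius selected 0 (0, 0, 0) q) (0, 0)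
    pb_loop q radius n (selected ++ [p]) (acc ++ pb_emit p)
  else acc
  termination_by n - acc.length
  decreasing_by simp [pb_emit]; split <;> simp <;> omega

def get_boundary_evaluation_order_alt (boundary : List (Int × Int)) : List (Int × Int) :=
  let quadrant := boundary.filter (fun p => decide (0 ≤ p.1) && decide (0 ≤ p.2))
  let radius := (PySem.List.max? (boundary.map (fun p => p.1)) (fun y => y)).getD 0
  let q0 := quadrant.getD 0 (0, 0)
  pb_loop quadrant radius boundary.length [q0] (pb_emit q0)

-- ===== PRECONDITION & SPEC =====
-- Pre_ excludes exactly the inputs on which Python A raises: an empty boundary (ValueError from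
-- max) and a boundary with no point having y ≥ 0 and x ≥ 0 (IndexError on quadrant[0]).
def Pre_get_boundary_evaluation_order (boundary : List (Int × Int)) : Prop :=
  ∃ p ∈ boundary, 0 ≤ p.1 ∧ 0 ≤ p.2
instance (boundary : List (Int × Int)) : Decidable (Pre_get_boundary_evaluation_order boundary) := by
  unfold Pre_get_boundary_evaluation_order; infer_instance

def pvWitness_get_boundary_evaluation_order : (List (Int × Int)) :=
  [(1, 0), (0, 1), (-1, 0), (0, -1)]

def Spec_get_boundary_evaluation_order (boundary : List (Int × Int)) (out : List (Int × Int)) : Prop := out = get_boundary_evaluation_order_alt boundary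
instance (boundary : List (Int × Int)) (out : List (Int × Int)) : Decidable (Spec_get_boundary_evaluation_order boundary out) := by unfold Spec_get_boundary_evaluation_order; infer_instance

-- ===== CLAIM (what is proved, stated in full; the proofs are below) =====
def Claim_equal_get_boundary_evaluation_order : Prop := ∀ (boundary : List (Int × Int)), Dom_get_boundary_evaluation_order boundary → Pre_get_boundary_evaluation_order boundary → Spec_get_boundary_evaluation_order boundary (get_boundary_evaluation_order boundary)

-- ===== LEMMAS AND PROOFS =====

theorem pb_dist_append_single (radius : Int) (sel : List (Int × Int)) (c p : Int × Int) :
    pb_dist radius (sel ++ [c]) p = min (pb_dist radius sel p) (max |p.1 - c.1| |p.2 - c.2|) := by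
  simp [pb_dist, List.foldl_append]

theorem pb_dist_nonneg (radius : Int) (sel : List (Int × Int)) (p : Int × Int)
    (hp : 0 ≤ p.1) : 0 ≤ pb_dist radius sel p := by
  unfold pb_dist
  have h0 : 0 ≤ max p.1 (radius - p.2) := le_max_of_le_left hp
  generalize max p.1 (radius - p.2) = a at h0 ⊢
  induction sel generalizing a with
  | nil => exact h0
  | cons s t ih =>
    exact ih _ (le_min h0 (le_max_of_le_left (abs_nonneg _)))

-- after `dists[iNext] = 0`, the fused update-then-min of A computes exactly B's recomputed distance
theorem set_forall2 (radius : Int) (sel : List (Int × Int)) :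
    ∀ (qs : List (Int × Int)) (k : Nat) (c : Int × Int),
    (∀ p ∈ qs, 0 ≤ p.1) → (k < qs.length → qs[k]! = c) →
    List.Forall₂ (fun d p => min d (max |p.1 - c.1| |p.2 - c.2|) = pb_dist radius (sel ++ [c]) p)
      ((qs.map (pb_dist radius sel)).set k 0) qs := by
  intro qs
  induction qs with
  | nil => intro k c _ _; simp
  | cons p t ih =>
    intro k c hpos hk
    match k with
    | 0 =>
      have hc : p = c := by simpa using hk (by simp)
      subst hc
      refine List.Forall₂.cons ?_ ?_
      · have := pb_dist_nonneg radius sel p (hpos p (by simp))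
        simp [pb_dist_append_single]
        omega
      · rw [List.forall₂_map_left_iff]
        refine (List.forall₂_same).2 ?_
        intro x _
        rw [pb_dist_append_single]
    | Nat.succ k' =>
      refine List.Forall₂.cons ?_ ?_
      · rw [pb_dist_append_single]
      · exact ih k' c (fun x hx => hpos x (by simp [hx])) (fun h => by simpa using hk (by simpa using Nat.succ_lt_succ h))

-- A's inner pass produces B's recomputed distance array and B's selection
theorem inner_spec (radius : Int) (sel : List (Int × Int)) (c : Int × Int) :
    ∀ (qs : List (Int × Int)) (ds : List Int) (i : Nat) (sdy : Int × Int) (si : Nat),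
    List.Forall₂ (fun d p => min d (max |p.1 - c.1| |p.2 - c.2|) = pb_dist radius (sel ++ [c]) p) ds qs →
    (pa_inner c i sdy si ds qs).1 = qs.map (pb_dist radius (sel ++ [c])) ∧
    (pa_inner c i sdy si ds qs).2.2 = pb_select radius (sel ++ [c]) i (si, sdy.1, sdy.2) qs := by
  intro qs ds i sdy si h
  induction h generalizing i sdy si with
  | nil => simp [pa_inner, pb_select]
  | @cons d p ds qs hdp _ ih =>
    have hmin : (if max |p.1 - c.1| |p.2 - c.2| < d then max |p.1 - c.1| |p.2 - c.2| else d)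
        = pb_dist radius (sel ++ [c]) p := by
      rw [← hdp]; split <;> omega
    simp only [pa_inner, pb_select, hmin]
    by_cases hc : sdy.1 < pb_dist radius (sel ++ [c]) p ∨
        (pb_dist radius (sel ++ [c]) p = sdy.1 ∧ sdy.2 < p.1)
    · simpa [hc] using ih (i + 1) (pb_dist radius (sel ++ [c]) p, p.1) i
    · simpa [hc] using ih (i + 1) sdy si

-- the two whole-loop states stay in lock-step
-- one-step unfolding equations for the two loops (kept as plain equations so rewrites stay robust)
theorem pa_loop_step (q : List (Int × Int)) (n : Nat) (ds : List Int) (iNext : Nat)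
    (acc : List (Int × Int)) (h : acc.length < n) :
    pa_loop q n ds iNext acc =
      pa_loop q n (pa_inner (q.getD iNext (0, 0)) 0 (0, 0) 0 (ds.set iNext 0) q).1
        (pa_inner (q.getD iNext (0, 0)) 0 (0, 0) 0 (ds.set iNext 0) q).2.2
        (acc ++ pa_block (q.getD iNext (0, 0))) := by
  rw [pa_loop]; simp only [dif_pos h]

theorem pa_loop_stop (q : List (Int × Int)) (n : Nat) (ds : List Int) (iNext : Nat)
    (acc : List (Int × Int)) (h : ¬ acc.length < n) : pa_loop q n ds iNext acc = acc := by
  rw [pa_loop]; simp only [dif_neg h]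

theorem pb_loop_step (q : List (Int × Int)) (radius : Int) (n : Nat)
    (sel acc : List (Int × Int)) (h : acc.length < n) :
    pb_loop q radius n sel acc =
      pb_loop q radius n (sel ++ [q.getD (pb_select radius sel 0 (0, 0, 0) q) (0, 0)])
        (acc ++ pb_emit (q.getD (pb_select radius sel 0 (0, 0, 0) q) (0, 0))) := by
  rw [pb_loop]; simp only [dif_pos h]

theorem pb_loop_stop (q : List (Int × Int)) (radius : Int) (n : Nat)
    (sel acc : List (Int × Int)) (h : ¬ acc.length < n) : pb_loop q radius n sel acc = acc := by
  rw [pb_loop]; simp only [dif_neg h]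

theorem loop_eq (q : List (Int × Int)) (radius : Int) (n : Nat)
    (hq : ∀ p ∈ q, 0 ≤ p.1) :
    ∀ (sel acc : List (Int × Int)),
    pa_loop q n (q.map (pb_dist radius sel)) (pb_select radius sel 0 (0, 0, 0) q) acc
      = pb_loop q radius n sel acc := by
  suffices H : ∀ (m : Nat) (sel acc : List (Int × Int)), n - acc.length = m →
      pa_loop q n (q.map (pb_dist radius sel)) (pb_select radius sel 0 (0, 0, 0) q) acc
        = pb_loop q radius n sel acc by
    exact fun sel acc => H _ sel acc rfl
  intro m
  induction m using Nat.strong_induction_on with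
  | _ m IH =>
    intro sel acc hm
    by_cases h : acc.length < n
    · rw [pa_loop_step q n _ _ acc h, pb_loop_step q radius n sel acc h]
      set i := pb_select radius sel 0 (0, 0, 0) q with hi
      set p := q.getD i (0, 0) with hp
      have hget : i < q.length → q[i]! = p := by
        intro hlt
        rw [hp, List.getD_eq_getElem?_getD, List.getElem?_eq_getElem hlt]
        simp [List.getElem!_eq_getElem?_getD, List.getElem?_eq_getElem hlt]
      have hspec := inner_spec radius sel p q ((q.map (pb_dist radius sel)).set i 0) 0 (0, 0) 0
        (set_forall2 radius sel q i p hq hget)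
      rw [hspec.1, hspec.2]
      have hblk : pa_block p = pb_emit p := rfl
      rw [hblk]
      have hlen : (acc ++ pb_emit p).length = acc.length + 4 := by
        simp [pb_emit]; split <;> simp
      exact IH (n - (acc ++ pb_emit p).length) (by rw [hlen]; omega)
        (sel ++ [p]) (acc ++ pb_emit p) rfl
    · rw [pa_loop_stop q n _ _ acc h, pb_loop_stop q radius n sel acc h]

theorem quadrant_nonneg (boundary : List (Int × Int)) :
    ∀ p ∈ boundary.filter (fun p => decide (0 ≤ p.1) && decide (0 ≤ p.2)), 0 ≤ p.1 := by
  intro p hp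
  have := List.of_mem_filter hp
  simp at this
  exact this.1

-- ===== VERDICT (by name: the statement is the Claim_ definition above) =====
theorem get_boundary_evaluation_order_spec : Claim_equal_get_boundary_evaluation_order := by
  intro boundary _hdom hpre
  unfold Spec_get_boundary_evaluation_order
  set q := boundary.filter (fun p => decide (0 ≤ p.1) && decide (0 ≤ p.2)) with hqdef
  set radius := (PySem.List.max? (boundary.map (fun p => p.1)) (fun y => y)).getD 0 with hrdef
  set q0 := q.getD 0 (0, 0) with hq0
  have hq : ∀ p ∈ q, 0 ≤ p.1 := quadrant_nonneg boundary
  obtain ⟨w, hw, hw1, hw2⟩ := hpre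
  have hn : 0 < boundary.length := List.length_pos_of_mem hw
  have ha : get_boundary_evaluation_order boundary
      = pa_loop q boundary.length (q.map (pb_dist radius [])) 0 [] := rfl
  have hb : get_boundary_evaluation_order_alt boundary
      = pb_loop q radius boundary.length [q0] (pb_emit q0) := rfl
  rw [ha, hb]
  rw [pa_loop_step q boundary.length _ 0 [] (by simpa using hn)]
  have hget : (0 : Nat) < q.length → q[0]! = q0 := by
    intro hlt
    rw [hq0, List.getD_eq_getElem?_getD, List.getElem?_eq_getElem hlt]
    simp [List.getElem!_eq_getElem?_getD, List.getElem?_eq_getElem hlt]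
  have hspec := inner_spec radius [] q0 q ((q.map (pb_dist radius [])).set 0 0) 0 (0, 0) 0
    (set_forall2 radius [] q 0 q0 hq hget)
  rw [hspec.1, hspec.2]
  have hblk : pa_block q0 = pb_emit q0 := rfl
  rw [hblk]
  simpa using loop_eq q radius boundary.length hq [q0] ([] ++ pb_emit q0)
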